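-- pv_equiv track=rewrite | github.com/thisis418/ProofAnalyzeHseProj | app/core/clients/db/scripts/download_wikipedia_math_facts_html.py | _is_article_href
-- ===== SOURCE A (Python) =====
-- def _is_article_href(href: str) -> bool:
--     if not href or not href.startswith("/wiki/"):
--         return False
--     bad_prefixes = (
--         "/wiki/Category:",
--         "/wiki/Help:",
--         "/wiki/File:",
--         "/wiki/Talk:",
--         "/wiki/Template:",
--         "/wiki/Wikipedia:",
--         "/wiki/Portal:",
--         "/wiki/Special:",
--     )
--     if any(href.startswith(p) for p in bad_prefixes):
--         return False
--     return True
-- ===== SOURCE B (Python) =====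
-- _BAD_NAMESPACES = frozenset({
--     "Category", "Help", "File", "Talk",
--     "Template", "Wikipedia", "Portal", "Special",
-- })
--
--
-- def _is_article_href(href: str) -> bool:
--     if href[:6] != "/wiki/":
--         return False
--     ns = []
--     for ch in href[6:]:
--         if ch == ":":
--             return "".join(ns) not in _BAD_NAMESPACES
--         ns.append(ch)
--     return True
-- ===== Notes on version B (the rewrite author's own statement) =====
-- stated objective: alternative
-- what changed: Instead of looping startswith over eight full bad prefixes, B checks the wiki path prefix by one slice comparison and then scans the remainder character by character, accumulating the namespace up to the first colon and doing a single set membership test (no colon means it is an article).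
import Mathlib
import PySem

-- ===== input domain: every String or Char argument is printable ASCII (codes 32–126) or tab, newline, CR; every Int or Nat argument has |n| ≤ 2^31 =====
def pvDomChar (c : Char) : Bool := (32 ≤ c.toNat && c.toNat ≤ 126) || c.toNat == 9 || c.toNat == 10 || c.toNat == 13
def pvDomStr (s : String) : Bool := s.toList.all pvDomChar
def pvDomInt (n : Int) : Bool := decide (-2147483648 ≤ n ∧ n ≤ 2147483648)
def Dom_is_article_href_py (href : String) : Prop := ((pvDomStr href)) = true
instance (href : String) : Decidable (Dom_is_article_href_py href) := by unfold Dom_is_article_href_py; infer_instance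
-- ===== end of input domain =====

-- B replaces A's loop of eight full-prefix startswith tests by one path-prefix slice comparison
-- followed by a single character scan that accumulates the namespace up to the first colon
-- and does one set-membership test (alternative decomposition; same cost class).

-- ===== PORT A =====
def pvBadPrefixes : List (List Char) :=
  ["/wiki/Category:".toList, "/wiki/Help:".toList, "/wiki/File:".toList, "/wiki/Talk:".toList,
   "/wiki/Template:".toList, "/wiki/Wikipedia:".toList, "/wiki/Portal:".toList, "/wiki/Special:".toList]

def is_article_href_py (href : String) : Bool :=
  if href.toList.isEmpty || !(PySem.Chars.startswith href.toList "/wiki/".toList) then false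
  else if pvBadPrefixes.any (fun p => PySem.Chars.startswith href.toList p) then false
  else true

-- ===== PORT B =====
def pvBadNamespaces : List (List Char) :=
  ["Category".toList, "Help".toList, "File".toList, "Talk".toList,
   "Template".toList, "Wikipedia".toList, "Portal".toList, "Special".toList]

-- the for-loop of Source B: scan the remainder, accumulating the namespace chars (`ns`)
def pvScanNS : List Char → List Char → Bool
  | [], _ => true
  | c :: t, ns => if c = ':' then !(pvBadNamespaces.contains ns) else pvScanNS t (ns ++ [c])

def is_article_href_py_alt (href : String) : Bool :=
  if PySem.Chars.slice href.toList none (some 6) ≠ "/wiki/".toList then false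
  else pvScanNS (PySem.Chars.slice href.toList (some 6) none) []

-- ===== PRECONDITION & SPEC =====
def Spec_is_article_href_py (href : String) (out : Bool) : Prop := out = is_article_href_py_alt href
instance (href : String) (out : Bool) : Decidable (Spec_is_article_href_py href out) := by unfold Spec_is_article_href_py; infer_instance

-- ===== CLAIM (what is proved, stated in full; the proofs are below) =====
def Claim_equal_is_article_href_py : Prop := ∀ (href : String), Dom_is_article_href_py href → Spec_is_article_href_py href (is_article_href_py href)

-- ===== LEMMAS AND PROOFS =====

-- the scan computes: no colon → true; colon → namespace-before-it not in the bad set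
lemma pvScanNS_char (rest acc : List Char) :
    pvScanNS rest acc =
      if ':' ∈ rest then !(pvBadNamespaces.contains (acc ++ rest.takeWhile (· ≠ ':'))) else true := by
  induction rest generalizing acc with
  | nil => simp [pvScanNS]
  | cons c t ih =>
    by_cases hc : c = ':'
    · subst hc; simp [pvScanNS]
    · simp [pvScanNS, hc, ih, Ne.symm hc, List.append_assoc]

-- if ':' occurs, the list splits as takeWhile ++ ':' :: tail
lemma split_at_colon (rest : List Char) (h : ':' ∈ rest) :
    ∃ t, rest = rest.takeWhile (· ≠ ':') ++ ':' :: t := by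
  induction rest with
  | nil => cases h
  | cons c t ih =>
    by_cases hc : c = ':'
    · subst hc; exact ⟨t, by simp⟩
    · have hm : ':' ∈ t := by cases h with
        | head => exact absurd rfl hc
        | tail _ h => exact h
      obtain ⟨u, hu⟩ := ih hm
      exact ⟨u, by simpa [hc] using congrArg (c :: ·) hu⟩

-- takeWhile up to the colon recovers the namespace name
lemma takeWhile_bad_name (name t : List Char) (hn : ':' ∉ name) :
    (name ++ ':' :: t).takeWhile (· ≠ ':') = name := by
  induction name with
  | nil => rw [List.nil_append, List.takeWhile_cons_of_neg (by simp)]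
  | cons a u ih =>
    have ha : a ≠ ':' := fun h => hn (by simp [h])
    have hu : ':' ∉ u := fun h => hn (by simp [h])
    rw [List.cons_append, List.takeWhile_cons_of_pos (by simp [ha]), ih hu]

-- the '<name>:' prefix test equals locating the first colon and comparing the part before it
lemma prefix_colon_iff (rest name : List Char) (hn : ':' ∉ name) :
    (name ++ [':']) <+: rest ↔ (':' ∈ rest ∧ rest.takeWhile (· ≠ ':') = name) := by
  constructor
  · rintro ⟨t, ht⟩
    subst ht
    exact ⟨by simp, by simpa using takeWhile_bad_name name t hn⟩
  · rintro ⟨hm, htw⟩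
    obtain ⟨t, ht⟩ := split_at_colon rest hm
    exact ⟨t, by rw [ht, htw]; simp⟩

-- A's post-guard test, with the "/wiki/" part peeled off, matches B's scan result
lemma tails_eq (rest : List Char) :
    (if pvBadPrefixes.any (fun p => PySem.Chars.startswith ("/wiki/".toList ++ rest) p) then false else true)
      = pvScanNS rest [] := by
  rw [pvScanNS_char]
  have hany : pvBadPrefixes.any (fun p => PySem.Chars.startswith ("/wiki/".toList ++ rest) p)
      = (decide (':' ∈ rest) && pvBadNamespaces.contains (rest.takeWhile (· ≠ ':'))) := by
    rw [Bool.eq_iff_iff]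
    simp only [pvBadPrefixes, pvBadNamespaces, List.any_cons, List.any_nil, Bool.or_false,
      Bool.or_eq_true, Bool.and_eq_true, decide_eq_true_eq, List.contains_iff_mem,
      PySem.Chars.startswith_iff, List.mem_cons, List.not_mem_nil, or_false]
    have hK : ∀ name : List Char, ':' ∉ name →
        (("/wiki/".toList ++ (name ++ [':'])) <+: ("/wiki/".toList ++ rest) ↔
          (':' ∈ rest ∧ rest.takeWhile (· ≠ ':') = name)) := by
      intro name hn
      rw [List.prefix_append_right_inj]
      exact prefix_colon_iff rest name hn
    constructor
    · rintro (h|h|h|h|h|h|h|h)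
      · obtain ⟨hm, he⟩ := (hK "Category".toList (by decide)).mp (by simpa using h); exact ⟨hm, Or.inl he⟩
      · obtain ⟨hm, he⟩ := (hK "Help".toList (by decide)).mp (by simpa using h); exact ⟨hm, Or.inr (Or.inl he)⟩
      · obtain ⟨hm, he⟩ := (hK "File".toList (by decide)).mp (by simpa using h); exact ⟨hm, Or.inr (Or.inr (Or.inl he))⟩
      · obtain ⟨hm, he⟩ := (hK "Talk".toList (by decide)).mp (by simpa using h); exact ⟨hm, Or.inr (Or.inr (Or.inr (Or.inl he)))⟩
      · obtain ⟨hm, he⟩ := (hK "Template".toList (by decide)).mp (by simpa using h); exact ⟨hm, Or.inr (Or.inr (Or.inr (Or.inr (Or.inl he))))⟩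
      · obtain ⟨hm, he⟩ := (hK "Wikipedia".toList (by decide)).mp (by simpa using h); exact ⟨hm, Or.inr (Or.inr (Or.inr (Or.inr (Or.inr (Or.inl he)))))⟩
      · obtain ⟨hm, he⟩ := (hK "Portal".toList (by decide)).mp (by simpa using h); exact ⟨hm, Or.inr (Or.inr (Or.inr (Or.inr (Or.inr (Or.inr (Or.inl he))))))⟩
      · obtain ⟨hm, he⟩ := (hK "Special".toList (by decide)).mp (by simpa using h); exact ⟨hm, Or.inr (Or.inr (Or.inr (Or.inr (Or.inr (Or.inr (Or.inr he))))))⟩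
    · rintro ⟨hm, (h|h|h|h|h|h|h|h)⟩
      · exact Or.inl (by simpa using (hK "Category".toList (by decide)).mpr ⟨hm, h⟩)
      · exact Or.inr (Or.inl (by simpa using (hK "Help".toList (by decide)).mpr ⟨hm, h⟩))
      · exact Or.inr (Or.inr (Or.inl (by simpa using (hK "File".toList (by decide)).mpr ⟨hm, h⟩)))
      · exact Or.inr (Or.inr (Or.inr (Or.inl (by simpa using (hK "Talk".toList (by decide)).mpr ⟨hm, h⟩))))
      · exact Or.inr (Or.inr (Or.inr (Or.inr (Or.inl (by simpa using (hK "Template".toList (by decide)).mpr ⟨hm, h⟩)))))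
      · exact Or.inr (Or.inr (Or.inr (Or.inr (Or.inr (Or.inl (by simpa using (hK "Wikipedia".toList (by decide)).mpr ⟨hm, h⟩))))))
      · exact Or.inr (Or.inr (Or.inr (Or.inr (Or.inr (Or.inr (Or.inl (by simpa using (hK "Portal".toList (by decide)).mpr ⟨hm, h⟩)))))))
      · exact Or.inr (Or.inr (Or.inr (Or.inr (Or.inr (Or.inr (Or.inr (by simpa using (hK "Special".toList (by decide)).mpr ⟨hm, h⟩)))))))
  rw [hany]
  by_cases hm : ':' ∈ rest
  · simp only [hm, decide_true, Bool.true_and, List.nil_append]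
    cases pvBadNamespaces.contains (rest.takeWhile (· ≠ ':')) <;> simp
  · simp [hm]

-- the two entry guards agree: take-6 equality vs startswith (emptiness is subsumed)
lemma guard_eq (l : List Char) :
    (l.isEmpty || !(PySem.Chars.startswith l "/wiki/".toList))
      = decide (l.take 6 ≠ "/wiki/".toList) := by
  rw [Bool.eq_iff_iff]
  simp only [Bool.or_eq_true, List.isEmpty_iff, Bool.not_eq_true', decide_eq_true_eq,
    Bool.eq_false_iff, Ne, PySem.Chars.startswith_iff]
  constructor
  · rintro (rfl | h) he
    · simp at he
    · exact h (by rw [← he]; exact List.take_prefix 6 l)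
  · intro h
    right
    intro hp
    exact h (by rw [List.prefix_iff_eq_take.mp hp]; rfl)

-- ===== VERDICT (by name: the statement is the Claim_ definition above) =====
theorem is_article_href_py_spec : Claim_equal_is_article_href_py := by
  intro href _
  unfold Spec_is_article_href_py is_article_href_py is_article_href_py_alt
  rw [guard_eq, PySem.Chars.slice_eq_listSlice, PySem.Chars.slice_eq_listSlice,
      PySem.List.slice_to _ (by norm_num : (0:Int) ≤ 6),
      PySem.List.slice_from _ (by norm_num : (0:Int) ≤ 6)]
  simp only [show (6:Int).toNat = 6 from rfl]
  by_cases hg : List.take 6 href.toList = "/wiki/".toList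
  · set rest := List.drop 6 href.toList with hrd
    have heq : href.toList = "/wiki/".toList ++ rest := by
      conv_lhs => rw [← List.take_append_drop 6 href.toList]
      rw [hg, ← hrd]
    rw [heq, if_neg (by simp), tails_eq rest, if_neg (by simp)]
  · rw [if_pos (by simpa using hg), if_pos hg]
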